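-- pv_equiv track=rewrite | github.com/hiromuaraki/AtC_Python | ABC/AtCorderProblems.py | func
-- ===== SOURCE A (Python) =====
-- def func(lst):
--   cur, count = 0, 0
--   for is_open in lst:
--     if is_open == 1:
--       # 開閉
--       cur += 2
--       continue
--     # 閉
--     count += 1 + cur
--     cur = 0
--   return count
-- ===== SOURCE B (Python) =====
-- def func(lst):
--     closes = [i for i, x in enumerate(lst) if x != 1]
--     if not closes:
--         return 0
--     return len(closes) + 2 * (closes[-1] + 1 - len(closes))
-- ===== Notes on version B (the rewrite author's own statement) =====
-- stated objective: alternative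
-- what changed: Replaces A's single stateful pass (a pending 'cur' accumulator flushed into count at each close) by a two-stage closed form: first collect the indices of the close elements, then compute #closes + 2*(opens before the last close) arithmetically from the last close index and the count of closes.
import Mathlib
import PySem

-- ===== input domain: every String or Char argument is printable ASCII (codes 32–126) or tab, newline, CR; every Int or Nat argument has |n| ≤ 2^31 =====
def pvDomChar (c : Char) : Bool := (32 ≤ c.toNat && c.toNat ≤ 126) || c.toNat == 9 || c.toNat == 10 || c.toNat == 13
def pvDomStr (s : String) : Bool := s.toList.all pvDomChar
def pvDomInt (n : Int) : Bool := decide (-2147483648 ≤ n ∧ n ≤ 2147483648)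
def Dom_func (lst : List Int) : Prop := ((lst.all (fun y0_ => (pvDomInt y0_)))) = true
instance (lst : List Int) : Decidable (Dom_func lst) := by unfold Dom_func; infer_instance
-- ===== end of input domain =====

-- B replaces A's stateful accumulator loop by a closed form: collect the indices of the
-- closes, then result = #closes + 2 * (#opens before the last close) (alternative, same cost).

-- ===== PORT A =====
def func (lst : List Int) : Int :=
  (lst.foldl (fun (s : Int × Int) is_open =>
      if is_open = 1 then (s.1 + 2, s.2) else (0, s.2 + 1 + s.1)) (0, 0)).2

-- ===== PORT B =====
def func_alt (lst : List Int) : Int :=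
  let closes := ((PySem.List.enumerate lst).filter (fun p => p.2 != 1)).map (fun p => p.1)
  -- 'closes[-1]' is guarded by non-emptiness in Source B, so it is the last element
  match closes.getLast? with
  | none => 0
  | some last => (closes.length : Int) + 2 * (last + 1 - (closes.length : Int))

-- ===== PRECONDITION & SPEC =====
def Spec_func (lst : List Int) (out : Int) : Prop := out = func_alt lst
instance (lst : List Int) (out : Int) : Decidable (Spec_func lst out) := by unfold Spec_func; infer_instance

-- ===== CLAIM (what is proved, stated in full; the proofs are below) =====
def Claim_equal_func : Prop := ∀ (lst : List Int), Dom_func lst → Spec_func lst (func lst)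

-- ===== LEMMAS AND PROOFS =====

def pvStepA (s : Int × Int) (is_open : Int) : Int × Int :=
  if is_open = 1 then (s.1 + 2, s.2) else (0, s.2 + 1 + s.1)

def pvCloses (lst : List Int) : List Int :=
  ((PySem.List.enumerate lst).filter (fun p => p.2 != 1)).map (fun p => p.1)

lemma pvCloses_append (lst : List Int) (x : Int) :
    pvCloses (lst ++ [x]) =
      pvCloses lst ++ (if x = 1 then [] else [(lst.length : Int)]) := by
  unfold pvCloses
  rw [PySem.List.enumerate_append]
  by_cases hx : x = 1 <;>
    simp [PySem.List.enumerate, hx, List.filter_append]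

lemma pvCloses_len (lst : List Int) :
    (pvCloses lst).length = (lst.filter (fun x => x != 1)).length := by
  unfold pvCloses
  rw [List.length_map]
  induction lst using List.reverseRecOn with
  | nil => simp [PySem.List.enumerate]
  | append_singleton l x ih =>
    rw [PySem.List.enumerate_append]
    by_cases hx : x = 1 <;>
      simp [PySem.List.enumerate, hx, List.filter_append, ih]

lemma pvAlt_eq (lst : List Int) :
    func_alt lst = match (pvCloses lst).getLast? with
      | none => 0
      | some last => ((pvCloses lst).length : Int) + 2 * (last + 1 - ((pvCloses lst).length : Int)) := rfl

lemma pvMain (lst : List Int) :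
    (lst.foldl pvStepA (0, 0)).2 = func_alt lst ∧
      (lst.foldl pvStepA (0, 0)).1 + (lst.foldl pvStepA (0, 0)).2
        = 2 * (lst.length : Int) - ((lst.filter (fun x => x != 1)).length : Int) := by
  induction lst using List.reverseRecOn with
  | nil => simp [func_alt, PySem.List.enumerate]
  | append_singleton l x ih =>
    obtain ⟨h1, h2⟩ := ih
    have hlen := pvCloses_len l
    rw [List.foldl_append]
    rw [pvAlt_eq] at h1 ⊢
    rw [pvCloses_append, List.filter_append, List.length_append]
    by_cases hx : x = 1
    · simp only [hx]
      constructor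
      · simpa [pvStepA] using h1
      · simp only [List.foldl_cons, List.foldl_nil, pvStepA]
        simp only [hx] at *
        push_cast
        simp only [List.filter_cons]
        norm_num
        omega
    · have hfx : (x != 1) = true := by simp [hx]
      have hlast : (pvCloses l ++ [(l.length : Int)]).getLast? = some (l.length : Int) :=
        List.getLast?_concat
      simp only [if_neg hx, hlast, List.length_append, List.length_singleton,
        List.foldl_cons, List.foldl_nil, pvStepA, List.filter_cons, hfx, if_true]
      have hc : ((pvCloses l).length : Int) = ((l.filter (fun x => x != 1)).length : Int) := by
        rw [hlen]
      clear h1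
      constructor
      · push_cast
        linarith [h2, hc]
      · simp only [List.length_cons, List.filter_nil, List.length_nil]
        push_cast
        linarith [h2, hc]

-- ===== VERDICT (by name: the statement is the Claim_ definition above) =====
theorem func_spec : Claim_equal_func := by
  intro lst _
  unfold Spec_func func
  have h := (pvMain lst).1
  simpa [pvStepA] using h
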